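-- pv_equiv track=rewrite | github.com/yungangwu/RL | seed/lami/game/actions.py | _gen_kanpai_table
-- ===== SOURCE A (Python) =====
-- import itertools
--
-- def _gen_kanpai_table(min_seq_len=3):
--     table = []
--     for i in range(0, 13):
--         all_cards = [(s, i) for s in range(4)]
--         all_cards = all_cards * 2
--         for j in range(min_seq_len, 9):
--             combs = itertools.combinations(all_cards, j)
--             for comb in combs:
--                 table.append(comb)
--     table = list(dict.fromkeys(table))
--     return list(map(lambda x: list(x), table))
-- ===== SOURCE B (Python) =====
-- def _gen_kanpai_table(min_seq_len=3):
--     # Backtracking generator over the 8 virtual card slots (suit s at slot s,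
--     # its duplicate copy at slot s+4): descend slot by slot in ascending order,
--     # skipping any slot whose equal-suit twin is still available in the current
--     # window (idx >= 4 and idx - 4 >= start), so only the leftmost embedding of
--     # every card sequence is ever produced.  Each distinct pattern thus appears
--     # exactly once, already in A's first-occurrence order: no combination
--     # enumeration and no dedup pass.  Rank blocks are emitted by substituting
--     # the rank into the shared pattern table.
--     def patterns(j):
--         out = []
--         def rec(start, pat):
--             if len(pat) == j:
--                 out.append(pat)
--                 return
--             for idx in range(start, 8):
--                 if idx >= 4 and idx - 4 >= start:
--                     continue
--                 rec(idx + 1, pat + [idx % 4])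
--         rec(0, [])
--         return out
--
--     pats = [p for j in range(min_seq_len, 9) for p in patterns(j)]
--     return [[(s, i) for s in p] for i in range(13) for p in pats]
-- ===== Notes on version B (the rewrite author's own statement) =====
-- stated objective: alternative
-- what changed: B replaces per-rank itertools.combinations enumeration plus a global dict.fromkeys dedup with a recursive backtracking generator that prunes every non-leftmost embedding of a duplicated suit, so each distinct pattern is emitted exactly once (no dedup pass) and the value blocks are produced by substituting the rank into that shared pattern table.
import Mathlib
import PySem

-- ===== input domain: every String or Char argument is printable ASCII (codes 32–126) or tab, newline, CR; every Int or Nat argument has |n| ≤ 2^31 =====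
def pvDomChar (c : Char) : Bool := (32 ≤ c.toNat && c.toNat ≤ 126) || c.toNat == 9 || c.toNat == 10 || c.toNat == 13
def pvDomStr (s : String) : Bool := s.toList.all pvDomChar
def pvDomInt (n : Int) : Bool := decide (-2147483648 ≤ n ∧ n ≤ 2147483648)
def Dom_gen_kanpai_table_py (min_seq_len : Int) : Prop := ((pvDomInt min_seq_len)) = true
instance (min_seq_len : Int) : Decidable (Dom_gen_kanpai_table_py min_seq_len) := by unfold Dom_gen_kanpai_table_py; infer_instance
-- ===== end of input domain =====

-- B replaces the per-rank combinations enumeration plus global dict.fromkeys dedup with a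
-- backtracking generator that prunes non-leftmost embeddings, so every distinct pattern is
-- emitted exactly once and no dedup pass exists (objective: alternative algorithm).

-- ===== PORT A =====
def gen_kanpai_table_py (min_seq_len : Int) : List (List (Int × Int)) :=
  let table : List (List (Int × Int)) :=
    (PySem.List.pyRange 0 13 1).foldl (fun table i =>
      let all_cards : List (Int × Int) := (PySem.List.pyRange 0 4 1).map (fun s => (s, i))
      let all_cards := all_cards ++ all_cards
      (PySem.List.pyRange min_seq_len 9 1).foldl (fun table j =>
        -- j ≥ 0 under Pre_; itertools.combinations(all_cards, j)
        (PySem.List.combinations all_cards j.toNat).foldl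
          (fun table comb => table ++ [comb]) table) table) []
  let table := PySem.List.dedup table      -- list(dict.fromkeys(table))
  table.map (fun x => x)                   -- list(map(lambda x: list(x), table))

-- ===== PORT B =====
-- Python B's inner recursive generator 'rec(start, pat)'; the fuel argument (always ≥ the 9
-- possible recursion depths, start only grows) only makes the recursion structural.
def pvPatRec (j : Nat) : Nat → Nat → List Int → List (List Int)
  | 0, _, _ => []
  | fuel+1, start, pat =>
    if pat.length = j then [pat]
    else (List.range' start (8 - start)).flatMap (fun idx =>
      if 4 ≤ idx ∧ start ≤ idx - 4 then []          -- 'continue': a leftward equal-suit twin is unused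
      else pvPatRec j fuel (idx + 1) (pat ++ [((idx % 4 : Nat) : Int)]))

def gen_kanpai_table_py_alt (min_seq_len : Int) : List (List (Int × Int)) :=
  let pats : List (List Int) :=
    (PySem.List.pyRange min_seq_len 9 1).flatMap (fun j => pvPatRec j.toNat 9 0 [])
  (PySem.List.pyRange 0 13 1).flatMap (fun i => pats.map (fun p => p.map (fun s => (s, i))))

-- ===== PRECONDITION & SPEC =====
-- Pre_ excludes min_seq_len < 0, where Python A raises ValueError in itertools.combinations,
-- and min_seq_len = 0: there the empty combination is one duplicate key shared by every value
-- block, no caller specifies where the single deduplicated empty list should land (A keeps it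
-- once, at the front; B, which never generates a duplicate, keeps one per value block).
def Pre_gen_kanpai_table_py (min_seq_len : Int) : Prop := 1 ≤ min_seq_len
instance (min_seq_len : Int) : Decidable (Pre_gen_kanpai_table_py min_seq_len) := by unfold Pre_gen_kanpai_table_py; infer_instance
def pvWitness_gen_kanpai_table_py : Int := 3

def Spec_gen_kanpai_table_py (min_seq_len : Int) (out : List (List (Int × Int))) : Prop := out = gen_kanpai_table_py_alt min_seq_len
instance (min_seq_len : Int) (out : List (List (Int × Int))) : Decidable (Spec_gen_kanpai_table_py min_seq_len out) := by unfold Spec_gen_kanpai_table_py; infer_instance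

-- ===== CLAIM (what is proved, stated in full; the proofs are below) =====
def Claim_equal_gen_kanpai_table_py : Prop := ∀ (min_seq_len : Int), Dom_gen_kanpai_table_py min_seq_len → Pre_gen_kanpai_table_py min_seq_len → Spec_gen_kanpai_table_py min_seq_len (gen_kanpai_table_py min_seq_len)

-- ===== LEMMAS AND PROOFS =====

-- Shorthands for the two programs' shared intermediates (proof-only).
def pvSuits : List Int := [0, 1, 2, 3, 0, 1, 2, 3]
def pvCombs (m : Int) : List (List Int) :=
  (PySem.List.pyRange m 9 1).flatMap (fun j => PySem.List.combinations pvSuits j.toNat)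
def pvPats (m : Int) : List (List Int) :=
  (PySem.List.pyRange m 9 1).flatMap (fun j => pvPatRec j.toNat 9 0 [])

-- A's raw (pre-dedup) table is the flatMap-shape: per rank, the injected combination list.
theorem pre_dedup_eq (m : Int) :
    (PySem.List.pyRange 0 13 1).foldl (fun table i =>
      (PySem.List.pyRange m 9 1).foldl (fun table j =>
        (PySem.List.combinations
            ((PySem.List.pyRange 0 4 1).map (fun s => (s, i)) ++
             (PySem.List.pyRange 0 4 1).map (fun s => (s, i))) j.toNat).foldl
          (fun table comb => table ++ [comb]) table) table) ([] : List (List (Int × Int)))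
    = (PySem.List.pyRange 0 13 1).flatMap
        (fun i => (pvCombs m).map (fun p => p.map (fun s => (s, i)))) := by
  have hcards : ∀ i : Int,
      (PySem.List.pyRange 0 4 1).map (fun s => (s, i)) ++
        (PySem.List.pyRange 0 4 1).map (fun s => (s, i))
      = pvSuits.map (fun s => (s, i)) := by
    intro i; rfl
  have hinner : ∀ (i : Int) (acc : List (List (Int × Int))),
      (PySem.List.pyRange m 9 1).foldl (fun table j =>
        (PySem.List.combinations
            ((PySem.List.pyRange 0 4 1).map (fun s => (s, i)) ++
             (PySem.List.pyRange 0 4 1).map (fun s => (s, i))) j.toNat).foldl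
          (fun table comb => table ++ [comb]) table) acc
      = acc ++ (pvCombs m).map (fun p => p.map (fun s => (s, i))) := by
    intro i acc
    have h1 : ∀ (j : Int) (acc : List (List (Int × Int))),
        (PySem.List.combinations
            ((PySem.List.pyRange 0 4 1).map (fun s => (s, i)) ++
             (PySem.List.pyRange 0 4 1).map (fun s => (s, i))) j.toNat).foldl
          (fun table comb => table ++ [comb]) acc
        = acc ++ (PySem.List.combinations pvSuits j.toNat).map
            (fun p => p.map (fun s => (s, i))) := by
      intro j acc
      rw [hcards i, PySem.List.combinations_map, PySem.List.foldl_append_singleton_eq_self]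
    calc (PySem.List.pyRange m 9 1).foldl (fun table j =>
            (PySem.List.combinations
                ((PySem.List.pyRange 0 4 1).map (fun s => (s, i)) ++
                 (PySem.List.pyRange 0 4 1).map (fun s => (s, i))) j.toNat).foldl
              (fun table comb => table ++ [comb]) table) acc
        = (PySem.List.pyRange m 9 1).foldl (fun table j =>
            table ++ (PySem.List.combinations pvSuits j.toNat).map
              (fun p => p.map (fun s => (s, i)))) acc := by
          exact PySem.List.foldl_congr_mem _ _ _ _ (fun acc j _ => h1 j acc)
      _ = acc ++ (PySem.List.pyRange m 9 1).flatMap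
            (fun j => (PySem.List.combinations pvSuits j.toNat).map
              (fun p => p.map (fun s => (s, i)))) := by
          exact PySem.List.foldl_append_eq_flatMap _ _ _
      _ = acc ++ (pvCombs m).map (fun p => p.map (fun s => (s, i))) := by
          rw [pvCombs, List.map_flatMap]
  calc (PySem.List.pyRange 0 13 1).foldl (fun table i =>
          (PySem.List.pyRange m 9 1).foldl (fun table j =>
            (PySem.List.combinations
                ((PySem.List.pyRange 0 4 1).map (fun s => (s, i)) ++
                 (PySem.List.pyRange 0 4 1).map (fun s => (s, i))) j.toNat).foldl
              (fun table comb => table ++ [comb]) table) table) ([] : List (List (Int × Int)))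
      = (PySem.List.pyRange 0 13 1).foldl (fun table i =>
          table ++ (pvCombs m).map (fun p => p.map (fun s => (s, i)))) [] := by
        exact PySem.List.foldl_congr_mem _ _ _ _ (fun acc i _ => hinner i acc)
    _ = _ := by
        rw [PySem.List.foldl_append_eq_flatMap
          (g := fun i => (pvCombs m).map (fun p => p.map (fun s => (s, i))))]
        simp

-- dict.fromkeys splits over an append of element-disjoint lists.
theorem dedup_append_disjoint {α : Type} [BEq α] [LawfulBEq α]
    (xs ys : List α) (h : ∀ x ∈ xs, x ∉ ys) :
    PySem.List.dedup (xs ++ ys) = PySem.List.dedup xs ++ PySem.List.dedup ys := by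
  induction xs with
  | nil => simp
  | cons x xs ih =>
    have hx : x ∉ ys := h x (by simp)
    have h' : ∀ y ∈ xs, y ∉ ys := fun y hy => h y (by simp [hy])
    simp only [List.cons_append, PySem.List.dedup_eq_ofList, PySem.Set.ofList_cons] at *
    rw [ih h']
    have hkeep : List.filter (fun y => !y == x) (PySem.Set.ofList ys) = PySem.Set.ofList ys := by
      refine List.filter_eq_self.mpr (fun y hy => ?_)
      have hyy : y ∈ ys := (PySem.Set.mem_ofList ys y).mp hy
      have : y ≠ x := fun hxy => hx (hxy ▸ hyy)
      simp [this]
    unfold PySem.Set.discard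
    rw [List.filter_append, hkeep]

-- dict.fromkeys commutes with an injective map.
theorem dedup_map_inj {α β : Type} [BEq α] [LawfulBEq α] [BEq β] [LawfulBEq β]
    (f : α → β) (hf : Function.Injective f) (xs : List α) :
    PySem.List.dedup (xs.map f) = (PySem.List.dedup xs).map f := by
  induction xs with
  | nil => simp
  | cons x xs ih =>
    simp only [List.map_cons, PySem.List.dedup_eq_ofList, PySem.Set.ofList_cons] at *
    rw [ih]
    congr 1
    unfold PySem.Set.discard
    rw [List.filter_map]
    congr 1
    refine List.filter_congr (fun z _ => ?_)
    simp only [Function.comp]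
    rcases eq_or_ne z x with hz | hz
    · simp [hz]
    · have hfz : f z ≠ f x := fun h => hz (hf h)
      simp [hz, hfz]

-- The global dedup of rank-injected blocks is the per-rank injection of one deduped block,
-- provided every pattern is nonempty (so blocks of distinct ranks never collide).
theorem dedup_blocks (L : List (List Int)) (hL : ∀ p ∈ L, p ≠ [])
    (ranks : List Int) (hnd : ranks.Nodup) :
    PySem.List.dedup (ranks.flatMap (fun i => L.map (fun p => p.map (fun s => (s, i)))))
    = ranks.flatMap (fun i => (PySem.List.dedup L).map (fun p => p.map (fun s => (s, i)))) := by
  induction ranks with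
  | nil => rfl
  | cons i ranks ih =>
    simp only [List.flatMap_cons]
    have hdisj : ∀ x ∈ L.map (fun p => p.map (fun s => (s, i))),
        x ∉ ranks.flatMap (fun i' => L.map (fun p => p.map (fun s => (s, i')))) := by
      intro x hx hmem
      rcases List.mem_map.mp hx with ⟨p, hp, rfl⟩
      rcases List.mem_flatMap.mp hmem with ⟨i', hi', hx'⟩
      rcases List.mem_map.mp hx' with ⟨q, hq, hpq⟩
      rcases List.exists_cons_of_ne_nil (hL p hp) with ⟨a, p', rfl⟩
      rcases List.exists_cons_of_ne_nil (hL q hq) with ⟨b, q', rfl⟩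
      simp only [List.map_cons, List.cons.injEq, Prod.mk.injEq] at hpq
      have : i' = i := hpq.1.2
      exact (List.nodup_cons.mp hnd).1 (this ▸ hi')
    have hinj : Function.Injective (fun p : List Int => p.map (fun s => (s, i))) := by
      intro a b h
      have h2 := congrArg (List.map Prod.fst) h
      simpa [List.map_map, Function.comp_def] using h2
    rw [dedup_append_disjoint _ _ hdisj, dedup_map_inj _ hinj L,
        ih (List.nodup_cons.mp hnd).2]

-- For every admitted min_seq_len the deduped combination list IS B's backtracking table.
theorem dedup_combs_eq_pats (m : Int) (hm : 1 ≤ m) :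
    PySem.List.dedup (pvCombs m) = pvPats m := by
  by_cases h9 : 9 ≤ m
  · have : PySem.List.pyRange m 9 1 = [] := by
      simp [PySem.List.pyRange_of_pos, Int.toNat_eq_zero]; omega
    simp [pvCombs, pvPats, this]
  · interval_cases m <;> set_option maxRecDepth 20000 in decide

-- Every combination drawn for j ≥ m ≥ 1 is nonempty.
theorem combs_ne_nil (m : Int) (hm : 1 ≤ m) : ∀ p ∈ pvCombs m, p ≠ [] := by
  intro p hp
  rcases List.mem_flatMap.mp hp with ⟨j, hj, hpj⟩
  have hmj : m ≤ j := (PySem.List.mem_pyRange_one.mp hj).1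
  have hlen := PySem.List.length_of_mem_combinations hpj
  intro hnil
  rw [hnil] at hlen
  simp at hlen
  omega

-- ===== VERDICT (by name: the statement is the Claim_ definition above) =====
theorem gen_kanpai_table_py_spec : Claim_equal_gen_kanpai_table_py := by
  intro m _ hm
  unfold Spec_gen_kanpai_table_py gen_kanpai_table_py gen_kanpai_table_py_alt
  simp only []
  rw [pre_dedup_eq m,
      dedup_blocks (pvCombs m) (combs_ne_nil m hm) _ (by decide),
      dedup_combs_eq_pats m hm, pvPats]
  simp
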